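-- pv_equiv track=rewrite | github.com/mmaltsev/ImageProcessing2 | project1/task1.2/main.py | borders
-- ===== SOURCE A (Python) =====
-- def borders(arr):
--     i = 0
--     while arr[i] <= 0 and i < len(arr):
--         i += 1
--     min = i
--     i = len(arr) - 1
--     while arr[i] <= 0 and i < len(arr):
--         i -= 1
--     max = i
--     return (min, max)
-- ===== SOURCE B (Python) =====
-- def borders(arr):
--     pos = [i for i, x in enumerate(arr) if x > 0]
--     return (pos[0], pos[-1])
-- ===== Notes on version B (the rewrite author's own statement) =====
-- stated objective: simpler
-- what changed: Replaces A's two directional while-scans (forward from 0 and backward from len-1) with one forward pass collecting all positive-value indices and reading the first and last entry of that list.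
import Mathlib
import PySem

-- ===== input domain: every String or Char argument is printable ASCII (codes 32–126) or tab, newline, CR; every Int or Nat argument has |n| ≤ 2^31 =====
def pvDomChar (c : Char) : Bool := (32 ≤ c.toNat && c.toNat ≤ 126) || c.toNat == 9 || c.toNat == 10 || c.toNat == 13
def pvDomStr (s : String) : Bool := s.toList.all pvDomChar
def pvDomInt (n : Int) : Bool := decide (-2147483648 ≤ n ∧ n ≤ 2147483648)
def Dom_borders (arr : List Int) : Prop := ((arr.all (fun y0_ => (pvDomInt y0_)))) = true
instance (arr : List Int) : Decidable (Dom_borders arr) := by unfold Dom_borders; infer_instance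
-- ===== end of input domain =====

-- B replaces A's two directional while-scans with one pass collecting positive indices and
-- reading its two ends; equivalence is proved on arrays containing a positive value (elsewhere
-- both Pythons raise IndexError).

-- ===== PORT A =====
-- forward scan: while arr[i] <= 0 and i < len(arr): i += 1   (none from pyGet? = Python IndexError)
def bordersLoopUp (arr : List Int) (i : Nat) : Nat → Nat
  | 0 => i
  | fuel + 1 =>
    match PySem.List.pyGet? arr (i : Int) with
    | none => i
    | some x => if x ≤ 0 ∧ (i : Int) < arr.length then bordersLoopUp arr (i + 1) fuel else i

-- backward scan: while arr[i] <= 0 and i < len(arr): i -= 1   (pyGet? wraps negative indices like Python)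
def bordersLoopDown (arr : List Int) (i : Int) : Nat → Int
  | 0 => i
  | fuel + 1 =>
    match PySem.List.pyGet? arr i with
    | none => i
    | some x => if x ≤ 0 ∧ i < arr.length then bordersLoopDown arr (i - 1) fuel else i

def borders (arr : List Int) : Int × Int :=
  let mn : Nat := bordersLoopUp arr 0 (arr.length + 1)
  let mx : Int := bordersLoopDown arr ((arr.length : Int) - 1) (arr.length + 1)
  ((mn : Int), mx)

-- ===== PORT B =====
-- pos = [i for i, x in enumerate(arr) if x > 0]
def bordersPos (arr : List Int) (i : Int) : List Int :=
  match arr with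
  | [] => []
  | x :: xs => if 0 < x then i :: bordersPos xs (i + 1) else bordersPos xs (i + 1)

-- return (pos[0], pos[-1])  (getD 0 is unreachable under Pre_: pos is nonempty)
def borders_alt (arr : List Int) : Int × Int :=
  let pos := bordersPos arr 0
  ((PySem.List.pyGet? pos 0).getD 0, (PySem.List.pyGet? pos (-1)).getD 0)

-- ===== PRECONDITION & SPEC =====
-- Pre_ excludes exactly the inputs (no strictly positive element, incl. []) on which A raises IndexError.
def Pre_borders (arr : List Int) : Prop := ∃ x ∈ arr, 0 < x
instance (arr : List Int) : Decidable (Pre_borders arr) := by unfold Pre_borders; infer_instance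
def pvWitness_borders : List Int := [-2, 3, 0]

def Spec_borders (arr : List Int) (out : Int × Int) : Prop := out = borders_alt arr
instance (arr : List Int) (out : Int × Int) : Decidable (Spec_borders arr out) := by unfold Spec_borders; infer_instance

-- ===== CLAIM (what is proved, stated in full; the proofs are below) =====
def Claim_equal_borders : Prop := ∀ (arr : List Int), Dom_borders arr → Pre_borders arr → Spec_borders arr (borders arr)

-- ===== LEMMAS AND PROOFS =====

-- first / last positive index, the common mathematical reference point of both ports
def firstPos : List Int → Option Nat
  | [] => none
  | x :: xs => if 0 < x then some 0 else (firstPos xs).map (· + 1)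

def lastPos : List Int → Option Nat
  | [] => none
  | x :: xs =>
    match lastPos xs with
    | some k => some (k + 1)
    | none => if 0 < x then some 0 else none

theorem firstPos_isSome_of_mem {arr : List Int} {x : Int} (hx : x ∈ arr) (hpos : 0 < x) :
    (firstPos arr).isSome := by
  induction arr with
  | nil => cases hx
  | cons a l ih =>
    simp only [firstPos]
    rcases List.mem_cons.mp hx with h | h
    · subst h; simp [hpos]
    · by_cases ha : 0 < a
      · simp [ha]
      · simpa [ha, Option.isSome_map] using ih h

theorem lastPos_isSome_of_mem {arr : List Int} {x : Int} (hx : x ∈ arr) (hpos : 0 < x) :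
    (lastPos arr).isSome := by
  induction arr with
  | nil => cases hx
  | cons a l ih =>
    simp only [lastPos]
    rcases List.mem_cons.mp hx with h | h
    · subst h
      cases hl : lastPos l with
      | some k => simp
      | none => simp [hpos]
    · cases hl : lastPos l with
      | some k => simp
      | none => simp [hl] at ih; exact absurd (ih h) (by simp)

theorem firstPos_lt_length {arr : List Int} {k : Nat} (h : firstPos arr = some k) :
    k < arr.length := by
  induction arr generalizing k with
  | nil => simp [firstPos] at h
  | cons a l ih =>
    simp only [firstPos] at h
    by_cases ha : 0 < a
    · simp [ha] at h; simp only [List.length_cons]; omega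
    · simp [ha, Option.map_eq_some_iff] at h
      obtain ⟨m, hm, hk⟩ := h
      have := ih hm
      simp only [List.length_cons]; omega

theorem lastPos_lt_length {arr : List Int} {k : Nat} (h : lastPos arr = some k) :
    k < arr.length := by
  induction arr generalizing k with
  | nil => simp [lastPos] at h
  | cons a l ih =>
    simp only [lastPos] at h
    cases hl : lastPos l with
    | some m =>
      simp only [hl, Option.some.injEq] at h
      have := ih hl
      simp only [List.length_cons]
      omega
    | none =>
      simp [hl] at h
      by_cases ha : 0 < a
      · simp [ha] at h; simp; omega
      · simp [ha] at h

-- A's forward loop computes firstPos (via drop)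
theorem loopUp_eq (arr : List Int) :
    ∀ (fuel i k : Nat), arr.length ≤ i + fuel → firstPos (arr.drop i) = some k →
      bordersLoopUp arr i fuel = i + k := by
  intro fuel
  induction fuel with
  | zero =>
    intro i k hfuel hfp
    have : arr.drop i = [] := List.drop_eq_nil_of_le (by omega)
    rw [this] at hfp; simp [firstPos] at hfp
  | succ fuel ih =>
    intro i k hfuel hfp
    by_cases hi : i < arr.length
    · have hd : arr.drop i = arr[i] :: arr.drop (i + 1) :=
        List.drop_eq_getElem_cons hi
      rw [hd] at hfp
      simp only [firstPos] at hfp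
      rw [bordersLoopUp, PySem.List.pyGet?_natCast]
      rw [List.getElem?_eq_getElem hi]
      show (if arr[i] ≤ 0 ∧ (i : Int) < (arr.length : Int) then bordersLoopUp arr (i + 1) fuel else i) = i + k
      by_cases hx : 0 < arr[i]
      · simp only [hx, if_pos] at hfp
        have hk : k = 0 := by simpa using hfp.symm
        have hne : ¬ (arr[i] ≤ 0 ∧ (i : Int) < (arr.length : Int)) := by
          intro ⟨h1, _⟩; omega
        rw [if_neg hne]
        omega
      · simp only [hx, if_neg, not_false_iff, Option.map_eq_some_iff] at hfp
        obtain ⟨m, hm, hk⟩ := hfp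
        have hcond : arr[i] ≤ 0 ∧ (i : Int) < (arr.length : Int) := by
          constructor; · omega
          · exact_mod_cast hi
        rw [if_pos hcond, ih (i + 1) m (by omega) hm]
        omega
    · have : arr.drop i = [] := List.drop_eq_nil_of_le (by omega)
      rw [this] at hfp; simp [firstPos] at hfp

-- behaviour of lastPos on a snoc, for the backward loop
theorem lastPos_append_singleton (l : List Int) (x : Int) :
    lastPos (l ++ [x]) = if 0 < x then some l.length else lastPos l := by
  induction l with
  | nil => simp [lastPos]
  | cons a t ih =>
    simp only [List.cons_append, lastPos, ih]
    by_cases hx : 0 < x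
    · simp [hx]
    · simp [hx]

-- A's backward loop computes lastPos (via take)
theorem loopDown_eq (arr : List Int) :
    ∀ (fuel i k : Nat), i < arr.length → i < fuel →
      lastPos (arr.take (i + 1)) = some k →
      bordersLoopDown arr (i : Int) fuel = (k : Int) := by
  intro fuel
  induction fuel with
  | zero => intro i k _ h _; omega
  | succ fuel ih =>
    intro i k hi hfuel hlp
    have htake : arr.take (i + 1) = arr.take i ++ [arr[i]] :=
      List.take_succ_eq_append_getElem hi
    rw [htake, lastPos_append_singleton] at hlp
    rw [bordersLoopDown]
    rw [PySem.List.pyGet?_natCast, List.getElem?_eq_getElem hi]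
    show (if arr[i] ≤ 0 ∧ (i : Int) < (arr.length : Int) then bordersLoopDown arr ((i : Int) - 1) fuel else (i : Int)) = (k : Int)
    by_cases hx : 0 < arr[i]
    · simp only [hx, if_pos] at hlp
      have hlen : (arr.take i).length = i := by simp; omega
      rw [hlen] at hlp
      have hk : k = i := by simpa using hlp.symm
      have hne : ¬ (arr[i] ≤ 0 ∧ (i : Int) < (arr.length : Int)) := by
        intro ⟨h1, _⟩; omega
      rw [if_neg hne]
      omega
    · simp only [hx, if_neg, not_false_iff] at hlp
      have hcond : arr[i] ≤ 0 ∧ (i : Int) < (arr.length : Int) := by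
        constructor; · omega
        · exact_mod_cast hi
      rw [if_pos hcond]
      -- loop continues at i - 1; lastPos (take i) = some k forces i ≠ 0
      have hi0 : i ≠ 0 := by
        intro h; subst h; simp [lastPos] at hlp
      obtain ⟨j, rfl⟩ := Nat.exists_eq_succ_of_ne_zero hi0
      rw [show ((j + 1 : Nat) : Int) - 1 = (j : Int) by push_cast; ring]
      exact ih j k (by omega) (by omega) (by simpa using hlp)

-- B's pos list: head and last in terms of firstPos / lastPos
theorem bordersPos_head? (arr : List Int) :
    ∀ i : Int, (bordersPos arr i).head? = (firstPos arr).map (fun k => i + k) := by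
  induction arr with
  | nil => intro i; simp [bordersPos, firstPos]
  | cons a l ih =>
    intro i
    simp only [bordersPos, firstPos]
    by_cases ha : 0 < a
    · simp [ha]
    · simp only [ha, if_neg, not_false_iff]
      rw [ih (i + 1)]
      cases firstPos l with
      | none => simp
      | some m => simp; ring

theorem bordersPos_getLast? (arr : List Int) :
    ∀ i : Int, (bordersPos arr i).getLast? = (lastPos arr).map (fun k => i + k) := by
  induction arr with
  | nil => intro i; simp [bordersPos, lastPos]
  | cons a l ih =>
    intro i
    simp only [bordersPos, lastPos]
    cases hl : lastPos l with
    | some k =>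
      have hne : bordersPos l (i + 1) ≠ [] := by
        intro h
        have := ih (i + 1)
        rw [h, hl] at this; simp at this
      by_cases ha : 0 < a
      · simp only [ha, if_pos, List.getLast?_cons]
        rw [ih (i + 1), hl]
        simp; ring
      · simp only [ha, if_neg, not_false_iff]
        rw [ih (i + 1), hl]; simp; ring
    | none =>
      have hnil : bordersPos l (i + 1) = [] := by
        have := ih (i + 1)
        rw [hl] at this; simpa using this
      by_cases ha : 0 < a
      · simp [ha, hnil]
      · simp [ha, hnil]

-- ===== VERDICT (by name: the statement is the Claim_ definition above) =====
theorem borders_spec : Claim_equal_borders := by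
  intro arr _ hpre
  obtain ⟨x, hx, hxpos⟩ := hpre
  -- firstPos and lastPos exist
  obtain ⟨f, hf⟩ := Option.isSome_iff_exists.mp (firstPos_isSome_of_mem hx hxpos)
  obtain ⟨l, hl⟩ := Option.isSome_iff_exists.mp (lastPos_isSome_of_mem hx hxpos)
  have hflen := firstPos_lt_length hf
  have hllen := lastPos_lt_length hl
  have hlen0 : 0 < arr.length := by omega
  unfold Spec_borders borders borders_alt
  -- A side
  have hA1 : bordersLoopUp arr 0 (arr.length + 1) = 0 + f :=
    loopUp_eq arr (arr.length + 1) 0 f (by omega) (by simpa using hf)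
  have hA2 : bordersLoopDown arr ((arr.length : Int) - 1) (arr.length + 1) = (l : Int) := by
    have hcast : ((arr.length : Int) - 1) = ((arr.length - 1 : Nat) : Int) := by
      push_cast [hlen0]; omega
    rw [hcast]
    refine loopDown_eq arr (arr.length + 1) (arr.length - 1) l (by omega) (by omega) ?_
    rw [show arr.length - 1 + 1 = arr.length from by omega, List.take_length]
    exact hl
  -- B side
  have hB1 : (bordersPos arr 0).head? = some ((f : Int)) := by
    rw [bordersPos_head? arr 0, hf]; simp
  have hB2 : (bordersPos arr 0).getLast? = some ((l : Int)) := by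
    rw [bordersPos_getLast? arr 0, hl]; simp
  simp only [hA1, hA2, PySem.List.pyGet?_zero, PySem.List.pyGet?_neg_one,
    ← List.head?_eq_getElem?, hB1, hB2, Option.getD_some]
  simp
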